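-- pv_equiv track=rewrite | github.com/Siddhesh25082001/Infytq-Preparation | Practice Problems/Level-2/1.py | close_number
-- ===== SOURCE A (Python) =====
-- def close_number(num1, num2, num3):
--
--     #start writing your code here
--     helperList = []
--     helperList.append(num1 - num2)
--     helperList.append(num1 - num3)
--     helperList.append(num2 - num1)
--     helperList.append(num2 - num3)
--     helperList.append(num3 - num1)
--     helperList.append(num3 - num2)
--
--     count = 0
--     for num in helperList:
--         if abs(num) == 1 or num == 0:
--             count = count + 1
--
--     if count == 2: return True
--     else: return False
-- ===== SOURCE B (Python) =====
-- def close_number(num1, num2, num3):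
--     # Order the triple: low/high via min/max, mid by subtraction from the sum.
--     low = min(num1, num2, num3)
--     high = max(num1, num2, num3)
--     mid = num1 + num2 + num3 - low - high
--     # Exactly one close pair exists iff exactly one of the two adjacent gaps is <= 1.
--     return (mid - low <= 1) != (high - mid <= 1)
-- ===== Notes on version B (the rewrite author's own statement) =====
-- stated objective: simpler
-- what changed: B does no pair enumeration and no counting: it orders the triple with min/max (mid by subtraction from the sum) and returns the XOR of the two adjacent gap tests (mid-low <= 1) != (high-mid <= 1), which holds exactly when A's ordered-difference count equals 2.
import Mathlib
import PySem

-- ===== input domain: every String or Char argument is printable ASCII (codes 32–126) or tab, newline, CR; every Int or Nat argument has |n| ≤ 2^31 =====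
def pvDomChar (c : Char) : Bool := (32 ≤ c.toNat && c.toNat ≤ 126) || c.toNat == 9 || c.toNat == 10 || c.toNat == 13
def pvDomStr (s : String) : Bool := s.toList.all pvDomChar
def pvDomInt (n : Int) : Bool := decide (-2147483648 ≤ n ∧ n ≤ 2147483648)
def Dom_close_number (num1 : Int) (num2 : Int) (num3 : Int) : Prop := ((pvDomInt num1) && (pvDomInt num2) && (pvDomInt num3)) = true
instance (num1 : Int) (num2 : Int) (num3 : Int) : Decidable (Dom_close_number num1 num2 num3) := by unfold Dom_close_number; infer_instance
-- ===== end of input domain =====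

-- B replaces A's 6-difference list and counter with a min/max ordering of the triple and an XOR of the two adjacent gap tests (simpler, same cost).

-- ===== PORT A =====
-- Port of A: build the 6-element list of ordered differences, count those that are 0 or ±1, test count == 2.
def close_number (num1 : Int) (num2 : Int) (num3 : Int) : Bool :=
  let helperList : List Int :=
    [num1 - num2, num1 - num3, num2 - num1, num2 - num3, num3 - num1, num3 - num2]
  let count : Int := helperList.foldl (fun c num => if num.natAbs = 1 ∨ num = 0 then c + 1 else c) 0
  if count = 2 then true else false

-- ===== PORT B =====
-- Port of B: low/high via min/max (Python's 3-argument min/max on ints), mid by subtraction, XOR of the two gap tests.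
def close_number_alt (num1 : Int) (num2 : Int) (num3 : Int) : Bool :=
  let low : Int := min num1 (min num2 num3)
  let high : Int := max num1 (max num2 num3)
  let mid : Int := num1 + num2 + num3 - low - high
  decide (mid - low ≤ 1) != decide (high - mid ≤ 1)

-- ===== PRECONDITION & SPEC =====
def Spec_close_number (num1 : Int) (num2 : Int) (num3 : Int) (out : Bool) : Prop := out = close_number_alt num1 num2 num3
instance (num1 : Int) (num2 : Int) (num3 : Int) (out : Bool) : Decidable (Spec_close_number num1 num2 num3 out) := by unfold Spec_close_number; infer_instance

-- ===== CLAIM (what is proved, stated in full; the proofs are below) =====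
def Claim_equal_close_number : Prop := ∀ (num1 : Int) (num2 : Int) (num3 : Int), Dom_close_number num1 num2 num3 → Spec_close_number num1 num2 num3 (close_number num1 num2 num3)

-- ===== LEMMAS AND PROOFS =====

-- ===== VERDICT (by name: the statement is the Claim_ definition above) =====
theorem close_number_spec : Claim_equal_close_number := by
  intro num1 num2 num3 _
  unfold Spec_close_number close_number close_number_alt
  simp only [List.foldl]
  have h21 : ((num2 - num1).natAbs = 1 ∨ num2 - num1 = 0) ↔ ((num1 - num2).natAbs = 1 ∨ num1 - num2 = 0) := by omega
  have h31 : ((num3 - num1).natAbs = 1 ∨ num3 - num1 = 0) ↔ ((num1 - num3).natAbs = 1 ∨ num1 - num3 = 0) := by omega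
  have h32 : ((num3 - num2).natAbs = 1 ∨ num3 - num2 = 0) ↔ ((num2 - num3).natAbs = 1 ∨ num2 - num3 = 0) := by omega
  simp only [h21, h31, h32]
  by_cases h12 : (num1 - num2).natAbs = 1 ∨ num1 - num2 = 0 <;>
    by_cases h13 : (num1 - num3).natAbs = 1 ∨ num1 - num3 = 0 <;>
      by_cases h23 : (num2 - num3).natAbs = 1 ∨ num2 - num3 = 0 <;>
        simp [h12, h13, h23, min_def, max_def] <;>
          split_ifs <;> omega
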